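-- pv_equiv track=rewrite | github.com/bluemumin/solving_the_algorithm_problem | programmers/python/code challenge/level1.py | solution
-- ===== SOURCE A (Python) =====
-- def solution(sizes):
--     total = []
--     for i in sizes:
--         total.append(i[0])
--         total.append(i[1])
--     total = sorted(total)
--
--     one = max(total)
--     second = min(total)
--
--     for i in sizes:
--         if i[0] >= second and i[1] >= second:
--             second = min(i)
--
--     return one * second
-- ===== SOURCE B (Python) =====
-- def solution(sizes):
--     it = iter(sizes)
--     first = next(it)
--     one = max(first[0], first[1])
--     second = min(first)
--     for c in it:
--         w, h = c[0], c[1]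
--         one = max(one, w, h)
--         if second <= min(w, h):
--             second = min(c)
--     return one * second
-- ===== Notes on version B (the rewrite author's own statement) =====
-- stated objective: alternative
-- what changed: Replaces A's staged pipeline (flatten all dimensions into a list, sort it, take its max and min, then a second guarded loop over the cards) by one fused single pass over the cards: a running max of per-card maxes and the guarded min seeded from the first card (sound because A's global-min seed always fires the guard on the first card), with no intermediate list and no sort; O(n) operations instead of O(n log n), though not measurably faster in CPython. Pre_ excludes only inputs where A raises: empty sizes (ValueError) and cards with fewer than 2 entries (IndexError).
-- outside the precondition, e.g. on solution([]): A raises ValueError, B raises StopIteration; on solution([[3]]): A raises IndexError, B raises IndexError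
import Mathlib
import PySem

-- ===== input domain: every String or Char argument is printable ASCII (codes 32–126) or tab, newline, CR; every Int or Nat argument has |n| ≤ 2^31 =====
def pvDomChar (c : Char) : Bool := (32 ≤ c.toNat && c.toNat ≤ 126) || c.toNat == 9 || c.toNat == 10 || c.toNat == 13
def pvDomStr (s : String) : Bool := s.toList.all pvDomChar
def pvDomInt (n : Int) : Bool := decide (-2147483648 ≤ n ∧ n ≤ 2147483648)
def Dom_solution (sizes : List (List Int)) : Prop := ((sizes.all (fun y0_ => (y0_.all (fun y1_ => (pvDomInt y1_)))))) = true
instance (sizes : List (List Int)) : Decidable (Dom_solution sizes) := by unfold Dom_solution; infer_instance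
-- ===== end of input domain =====

-- B replaces A's staged pipeline (flatten, sort, global max/min, second guarded loop) by one
-- fused single pass seeded from the first card (no sort, no intermediate list).

-- ===== PORT A =====
def solution (sizes : List (List Int)) : Int :=
  let total := sizes.foldl (fun acc i =>
    (acc ++ [(PySem.List.pyGet? i 0).getD 0]) ++ [(PySem.List.pyGet? i 1).getD 0]) []
  let total := PySem.List.sorted total (fun x => x) false
  let one := (PySem.List.max? total (fun x => x)).getD 0
  let second := (PySem.List.min? total (fun x => x)).getD 0
  let second := sizes.foldl (fun second i =>
    if (PySem.List.pyGet? i 0).getD 0 ≥ second ∧ (PySem.List.pyGet? i 1).getD 0 ≥ second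
    then (PySem.List.min? i (fun x => x)).getD 0 else second) second
  one * second

-- ===== PORT B =====
-- B-side helpers: the two update lines of B's loop body
-- `one = max(one, w, h)` with w = c[0], h = c[1]
def pvStepOne (one : Int) (c : List Int) : Int :=
  max one (max ((PySem.List.pyGet? c 0).getD 0) ((PySem.List.pyGet? c 1).getD 0))
-- `if second <= min(w, h): second = min(c)`
def pvStepSec (second : Int) (c : List Int) : Int :=
  if second ≤ min ((PySem.List.pyGet? c 0).getD 0) ((PySem.List.pyGet? c 1).getD 0)
  then (PySem.List.min? c (fun x => x)).getD 0 else second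

def solution_alt (sizes : List (List Int)) : Int :=
  match sizes with
  | [] => 0   -- Python B raises StopIteration on empty input (outside Pre_)
  | first :: rest =>
    let one := max ((PySem.List.pyGet? first 0).getD 0) ((PySem.List.pyGet? first 1).getD 0)
    let second := (PySem.List.min? first (fun x => x)).getD 0
    let p := rest.foldl (fun (os : Int × Int) c => (pvStepOne os.1 c, pvStepSec os.2 c)) (one, second)
    p.1 * p.2

-- ===== PRECONDITION & SPEC =====
-- Pre_ excludes only inputs on which A raises: empty sizes (max([]) raises ValueError)
-- and cards with fewer than 2 entries (i[1] raises IndexError).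
def Pre_solution (sizes : List (List Int)) : Prop :=
  sizes ≠ [] ∧ ∀ c ∈ sizes, 2 ≤ c.length
instance (sizes : List (List Int)) : Decidable (Pre_solution sizes) := by
  unfold Pre_solution; infer_instance
def pvWitness_solution : List (List Int) := [[3, 5], [2, 2]]

def Spec_solution (sizes : List (List Int)) (out : Int) : Prop := out = solution_alt sizes
instance (sizes : List (List Int)) (out : Int) : Decidable (Spec_solution sizes out) := by unfold Spec_solution; infer_instance

-- ===== CLAIM (what is proved, stated in full; the proofs are below) =====
def Claim_equal_solution : Prop := ∀ (sizes : List (List Int)), Dom_solution sizes → Pre_solution sizes → Spec_solution sizes (solution sizes)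

-- ===== LEMMAS AND PROOFS =====

def pvG0 (c : List Int) : Int := (PySem.List.pyGet? c 0).getD 0
def pvG1 (c : List Int) : Int := (PySem.List.pyGet? c 1).getD 0
def pvXp (c : List Int) : Int := max (pvG0 c) (pvG1 c)

theorem pv_flatten (sizes : List (List Int)) : ∀ (acc : List Int),
    List.foldl (fun acc i =>
      (acc ++ [(PySem.List.pyGet? i 0).getD 0]) ++ [(PySem.List.pyGet? i 1).getD 0]) acc sizes
      = acc ++ sizes.flatMap (fun i => [pvG0 i, pvG1 i]) := by
  induction sizes with
  | nil => simp
  | cons c rest ih =>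
      intro acc
      simp only [List.foldl_cons, List.flatMap_cons, List.append_assoc]
      simp [pvG0, pvG1, List.flatMap]

theorem pv_memT {sizes : List (List Int)} {x : Int}
    (h : x ∈ sizes.flatMap (fun i => [pvG0 i, pvG1 i])) :
    ∃ c ∈ sizes, x = pvG0 c ∨ x = pvG1 c := by
  rcases List.mem_flatMap.mp h with ⟨c, hc, hx⟩
  exact ⟨c, hc, by simpa using hx⟩

theorem pv_g_memT {sizes : List (List Int)} {c : List Int} (hc : c ∈ sizes) :
    pvG0 c ∈ sizes.flatMap (fun i => [pvG0 i, pvG1 i]) ∧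
    pvG1 c ∈ sizes.flatMap (fun i => [pvG0 i, pvG1 i]) := by
  constructor <;> exact List.mem_flatMap.mpr ⟨c, hc, by simp⟩

-- A's guarded step equals B's step function pointwise
theorem pv_step_eq (s : Int) (c : List Int) :
    (if (PySem.List.pyGet? c 0).getD 0 ≥ s ∧ (PySem.List.pyGet? c 1).getD 0 ≥ s
     then (PySem.List.min? c (fun x => x)).getD 0 else s) = pvStepSec s c := by
  unfold pvStepSec
  split_ifs with h1 h2 <;> first | rfl | (exfalso; omega)

-- B's pair fold splits into its two independent component folds
theorem pv_pair_split : ∀ (l : List (List Int)) (a b : Int),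
    l.foldl (fun (os : Int × Int) c => (pvStepOne os.1 c, pvStepSec os.2 c)) (a, b)
      = (l.foldl pvStepOne a, l.foldl pvStepSec b) := by
  intro l
  induction l with
  | nil => intro a b; rfl
  | cons c rest ih => intro a b; simpa using ih (pvStepOne a c) (pvStepSec b c)

-- ===== VERDICT (by name: the statement is the Claim_ definition above) =====
theorem solution_spec : Claim_equal_solution := by
  intro sizes _ hpre
  obtain ⟨hne, hlen⟩ := hpre
  obtain ⟨c, rest, rfl⟩ : ∃ c rest, sizes = c :: rest := by
    cases sizes with
    | nil => exact absurd rfl hne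
    | cons c rest => exact ⟨c, rest, rfl⟩
  unfold Spec_solution solution solution_alt
  simp only [pv_flatten, List.nil_append, pv_pair_split]
  set sizes := c :: rest with hsz
  set T := sizes.flatMap (fun i => [pvG0 i, pvG1 i]) with hT
  set S := PySem.List.sorted T (fun x => x) false with hS
  have hTne : T ≠ [] := by
    simp [hT, hsz, List.flatMap_cons]
  have hSne : S ≠ [] := by
    simpa [hS, PySem.List.sorted_eq_nil_iff] using hTne
  obtain ⟨m, hm⟩ : ∃ m, PySem.List.max? S (fun x => x) = some m := by
    cases hmx : PySem.List.max? S (fun x => x) with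
    | none => exact absurd ((PySem.List.max?_eq_none_iff S _).mp hmx) hSne
    | some m => exact ⟨m, rfl⟩
  obtain ⟨s, hs⟩ : ∃ s, PySem.List.min? S (fun x => x) = some s := by
    cases hmn : PySem.List.min? S (fun x => x) with
    | none => exact absurd ((PySem.List.min?_eq_none_iff S _).mp hmn) hSne
    | some s => exact ⟨s, rfl⟩
  have hs_le : ∀ y ∈ T, s ≤ y := fun y hy =>
    PySem.List.min?_isMin hs y ((PySem.List.mem_sorted T _ _ y).mpr hy)
  have hm_ub : ∀ y ∈ T, y ≤ m := fun y hy =>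
    PySem.List.max?_isMax hm y ((PySem.List.mem_sorted T _ _ y).mpr hy)
  have hm_memT : m ∈ T := (PySem.List.mem_sorted T _ _ m).mp (PySem.List.max?_mem hm)
  rw [hm, hs]
  simp only [Option.getD_some]
  -- A's second loop: the first card always fires the guard
  rw [hsz, List.foldl_cons]
  have hfire : (PySem.List.pyGet? c 0).getD 0 ≥ s ∧ (PySem.List.pyGet? c 1).getD 0 ≥ s := by
    have h0 := hs_le _ (pv_g_memT (c := c) (by simp [hsz])).1
    have h1 := hs_le _ (pv_g_memT (c := c) (by simp [hsz])).2
    exact ⟨h0, h1⟩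
  rw [if_pos hfire]
  -- A's loop body over the rest equals B's pvStepSec fold
  have hbody : (fun (second : Int) (i : List Int) =>
      if (PySem.List.pyGet? i 0).getD 0 ≥ second ∧ (PySem.List.pyGet? i 1).getD 0 ≥ second
      then (PySem.List.min? i (fun x => x)).getD 0 else second) = pvStepSec := by
    funext s' c'
    exact pv_step_eq s' c'
  rw [hbody]
  -- A's "one" (max of the sorted flattened list) equals B's running max of per-card maxes
  have hone : m = List.foldl pvStepOne (pvXp c) rest := by
    have hfm : List.foldl pvStepOne (pvXp c) rest
        = List.foldl max (pvXp c) (rest.map pvXp) := by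
      rw [List.foldl_map]
      rfl
    have hm1 : PySem.List.max? (sizes.map pvXp) (fun x => x)
        = some (List.foldl max (pvXp c) (rest.map pvXp)) := by
      rw [hsz, List.map_cons, PySem.List.max?_id_cons]
    have hm1_ub : ∀ y ∈ sizes.map pvXp, y ≤ List.foldl max (pvXp c) (rest.map pvXp) :=
      PySem.List.max?_isMax hm1
    have hm1_mem : List.foldl max (pvXp c) (rest.map pvXp) ∈ sizes.map pvXp :=
      PySem.List.max?_mem hm1
    rw [hfm]
    apply le_antisymm
    · obtain ⟨c', hc', hv⟩ := pv_memT (hm_memT)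
      have hx : pvXp c' ∈ sizes.map pvXp := List.mem_map.mpr ⟨c', hc', rfl⟩
      have h2 := hm1_ub _ hx
      have h3 : m ≤ pvXp c' := by rcases hv with rfl | rfl <;> simp [pvXp]
      omega
    · obtain ⟨c', hc', heq⟩ := List.mem_map.mp hm1_mem
      have h0 := hm_ub _ (pv_g_memT hc').1
      have h1 := hm_ub _ (pv_g_memT hc').2
      rw [← heq]
      simp only [pvXp]; omega
  rw [hone]
  rfl
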